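-- pv_equiv track=rewrite | github.com/VishnuprakashSelvarajan/DailyCoding | TwoSum.py | getDifferentNumber
-- ===== SOURCE A (Python) =====
-- def getDifferentNumber(arr):
--     if 0 not in arr:
--         return 0
--     arr.sort()
--     next_num = 1
--     previous_num = 0
--     for i in range(1, len(arr)):
--         if previous_num == arr[i]:
--             continue
--         elif next_num != arr[i]:
--             return next_num
--         else:
--             next_num +=1
--             previous_num += 1
--     return arr[-1]+1
-- ===== SOURCE B (Python) =====
-- def getDifferentNumber(arr):
--     # Build a set once, then chase the first absent non-negative integer.
--     # No sorting, and arr is left unmutated (A sorts it in place).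
--     present = set(arr)
--     i = 0
--     while i in present:
--         i += 1
--     return i
-- ===== Notes on version B (the rewrite author's own statement) =====
-- stated objective: simpler
-- what changed: Replaces sort-then-scan (with its next/previous bookkeeping) by building a set once and chasing the first non-negative integer absent from it (the classic mex formulation); B does not mutate arr, while A sorts it in place.
-- intended difference: On arrays containing 0, 1 and at least two negative elements, A returns 1 (its scan hits the second negative and mistakes it for a gap) even though 1 is present, while B returns the true smallest absent non-negative integer (>= 2), which is the intended mex. — e.g. on getDifferentNumber([-2, -1, 0, 1]): A returns 1, B returns 2
import Mathlib
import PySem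

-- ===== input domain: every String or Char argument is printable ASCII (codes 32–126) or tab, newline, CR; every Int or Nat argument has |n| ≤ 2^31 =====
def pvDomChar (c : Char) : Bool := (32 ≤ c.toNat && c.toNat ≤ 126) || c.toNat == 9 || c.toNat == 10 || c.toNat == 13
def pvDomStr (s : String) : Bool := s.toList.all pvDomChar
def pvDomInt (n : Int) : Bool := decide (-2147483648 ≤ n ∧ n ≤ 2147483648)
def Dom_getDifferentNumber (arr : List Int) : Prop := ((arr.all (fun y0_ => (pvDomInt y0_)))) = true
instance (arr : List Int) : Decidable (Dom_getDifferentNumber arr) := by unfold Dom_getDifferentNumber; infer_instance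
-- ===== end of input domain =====

-- B replaces A's sort-then-scan with a set built once plus a chase for the
-- first non-negative integer absent from it (the plain mex formulation).
-- NOTE on side effects: Python A sorts arr in place; B leaves arr untouched.
-- The equivalence proved here is about the RETURN value only.

-- ===== PORT A =====
-- 'for i in range(1, len(arr))' over the sorted list reads consecutive
-- elements, so it is ported as structural recursion over (sorted arr).drop 1;
-- 'some v' is the early 'return next_num', 'none' means the loop completed.
def pvALoop : List Int → Int → Int → Option Int
  | [], _, _ => none
  | x :: xs, next_num, previous_num =>
      if previous_num = x then pvALoop xs next_num previous_num
      else if next_num ≠ x then some next_num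
      else pvALoop xs (next_num + 1) (previous_num + 1)

def getDifferentNumber (arr : List Int) : Int :=
  if (0 : Int) ∈ arr then
    let s := PySem.List.sorted arr (fun x => x) false
    match pvALoop (s.drop 1) 1 0 with
    | some v => v
    -- arr[-1] + 1: s is nonempty here (0 ∈ arr), so pyGet? is always some and
    -- the .getD 0 default is never used.
    | none => (PySem.List.pyGet? s (-1)).getD 0 + 1
  else 0

-- ===== PORT B =====
-- 'while i in present: i += 1': i stops at latest at arr.length (the set has
-- at most arr.length distinct elements, so some value in 0..arr.length is
-- absent), hence fuel arr.length + 1 makes the recursion run exactly as the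
-- Python while-loop does.
def pvBLoop (present : List Int) : Nat → Int → Int
  | 0, i => i
  | fuel + 1, i => if i ∈ present then pvBLoop present fuel (i + 1) else i

def getDifferentNumber_alt (arr : List Int) : Int :=
  let present := PySem.Set.ofList arr
  pvBLoop present (arr.length + 1) 0

-- ===== PRECONDITION & SPEC =====
-- On arrays containing 0, 1 and at least two negative elements, A returns 1
-- (its scan hits the second negative and mistakes it for a gap) even though 1
-- is present, while B returns the true smallest absent non-negative integer
-- (≥ 2), which is the intended mex.
def D_getDifferentNumber (arr : List Int) : Prop :=
  2 ≤ (arr.filter (fun x => x < 0)).length ∧ (0 : Int) ∈ arr ∧ (1 : Int) ∈ arr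
instance (arr : List Int) : Decidable (D_getDifferentNumber arr) := by
  unfold D_getDifferentNumber; infer_instance

def Spec_getDifferentNumber (arr : List Int) (out : Int) : Prop :=
  ¬ D_getDifferentNumber arr → out = getDifferentNumber_alt arr
instance (arr : List Int) (out : Int) : Decidable (Spec_getDifferentNumber arr out) := by
  unfold Spec_getDifferentNumber; infer_instance

def pvDiffWitness_getDifferentNumber : List Int := [-2, -1, 0, 1]
def pvDiffWitnessOut_getDifferentNumber : Int × Int := (1, 2)

-- ===== CLAIM (what is proved, stated in full; the proofs are below) =====
def Claim_unchanged_getDifferentNumber : Prop := ∀ (arr : List Int), Dom_getDifferentNumber arr → Spec_getDifferentNumber arr (getDifferentNumber arr)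
def Claim_changed_getDifferentNumber : Prop := Dom_getDifferentNumber (pvDiffWitness_getDifferentNumber) ∧ D_getDifferentNumber (pvDiffWitness_getDifferentNumber) ∧ getDifferentNumber (pvDiffWitness_getDifferentNumber) = pvDiffWitnessOut_getDifferentNumber.1 ∧ getDifferentNumber_alt (pvDiffWitness_getDifferentNumber) = pvDiffWitnessOut_getDifferentNumber.2 ∧ pvDiffWitnessOut_getDifferentNumber.1 ≠ pvDiffWitnessOut_getDifferentNumber.2
def Claim_exact_getDifferentNumber : Prop := ∀ (arr : List Int), Dom_getDifferentNumber arr → D_getDifferentNumber arr → getDifferentNumber arr ≠ getDifferentNumber_alt arr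

-- ===== LEMMAS AND PROOFS =====

-- IsMex arr m: m is the smallest non-negative integer absent from arr.
def IsMex (arr : List Int) (m : Int) : Prop :=
  0 ≤ m ∧ m ∉ arr ∧ ∀ k : Int, 0 ≤ k → k < m → k ∈ arr

theorem isMex_unique {arr : List Int} {m₁ m₂ : Int}
    (h₁ : IsMex arr m₁) (h₂ : IsMex arr m₂) : m₁ = m₂ := by
  obtain ⟨h10, h1n, h1a⟩ := h₁
  obtain ⟨h20, h2n, h2a⟩ := h₂
  rcases lt_trichotomy m₁ m₂ with h | h | h
  · exact absurd (h2a m₁ h10 h) h1n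
  · exact h
  · exact absurd (h1a m₂ h20 h) h2n

-- ===== B-side: getDifferentNumber_alt computes the mex =====

theorem pvBLoop_spec (present : List Int) :
    ∀ (fuel : Nat) (i : Int),
      (∃ m : Int, i ≤ m ∧ m < i + fuel ∧ m ∉ present) →
      (pvBLoop present fuel i ∉ present ∧ i ≤ pvBLoop present fuel i ∧
        ∀ k : Int, i ≤ k → k < pvBLoop present fuel i → k ∈ present) := by
  intro fuel
  induction fuel with
  | zero =>
      intro i ⟨m, h1, h2, _⟩; omega
  | succ n ih =>
      intro i ⟨m, h1, h2, h3⟩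
      by_cases hi : i ∈ present
      · have hmi : i ≠ m := fun h => h3 (h ▸ hi)
        obtain ⟨hn, hle, hall⟩ := ih (i + 1) ⟨m, by omega, by omega, h3⟩
        refine ⟨by simpa [pvBLoop, hi] using hn, by simp [pvBLoop, hi]; omega, ?_⟩
        intro k hk1 hk2
        simp only [pvBLoop, if_pos hi] at hk2
        rcases eq_or_lt_of_le hk1 with h | h
        · exact h ▸ hi
        · exact hall k (by omega) hk2
      · exact ⟨by simpa [pvBLoop, hi], by simp [pvBLoop, hi], by intro k h1 h2; simp [pvBLoop, hi] at h2; omega⟩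

-- pigeonhole: some value in 0..n is absent from a nodup sublist-as-set of arr
theorem exists_missing (arr : List Int) :
    ∃ m : Int, 0 ≤ m ∧ m < (arr.length : Int) + 1 ∧ m ∉ PySem.Set.ofList arr := by
  by_contra h
  push_neg at h
  have hsub : (Finset.range (arr.length + 1)).image (fun n : ℕ => (n : Int)) ⊆
      (PySem.Set.ofList arr).toFinset := by
    intro x hx
    simp only [Finset.mem_image, Finset.mem_range] at hx
    obtain ⟨n, hn, rfl⟩ := hx
    have := h (n : Int) (by positivity) (by exact_mod_cast hn)
    simpa using this
  have hcard := Finset.card_le_card hsub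
  rw [Finset.card_image_of_injective _ (fun a b => by exact_mod_cast id)] at hcard
  have h1 : ((PySem.Set.ofList arr).toFinset).card ≤ (PySem.Set.ofList arr).length :=
    (PySem.Set.ofList arr).toFinset_card_le
  have h2 : (PySem.Set.ofList arr).length ≤ arr.length := by
    have hnd : (PySem.Set.ofList arr).Nodup := PySem.Set.nodup_ofList arr
    have hsub2 : (PySem.Set.ofList arr) ⊆ arr := by
      intro x hx; exact (PySem.Set.mem_ofList _ _).1 hx
    calc (PySem.Set.ofList arr).length = (PySem.Set.ofList arr).toFinset.card :=
            (List.toFinset_card_of_nodup hnd).symm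
      _ ≤ arr.toFinset.card := Finset.card_le_card (fun x hx => by
            simp only [List.mem_toFinset] at *; exact hsub2 hx)
      _ ≤ arr.length := arr.toFinset_card_le
  simp only [Finset.card_range] at hcard
  omega

theorem alt_isMex (arr : List Int) : IsMex arr (getDifferentNumber_alt arr) := by
  obtain ⟨m, hm0, hmlt, hmn⟩ := exists_missing arr
  obtain ⟨hn, hle, hall⟩ := pvBLoop_spec (PySem.Set.ofList arr) (arr.length + 1) 0
    ⟨m, hm0, by push_cast; omega, hmn⟩
  refine ⟨hle, ?_, ?_⟩
  · intro h
    exact hn ((PySem.Set.mem_ofList _ _).2 h)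
  · intro k hk1 hk2
    exact (PySem.Set.mem_ofList _ _).1 (hall k hk1 hk2)

-- ===== A-side: the loop on the sorted tail =====

-- the value A computes from the loop result
def aResult (t : List Int) (p d : Int) : Int :=
  match pvALoop t (p + 1) p with
  | some v => v
  | none => d + 1

theorem pvALoop_spec :
    ∀ (t : List Int) (p d : Int),
      t.Pairwise (· ≤ ·) → (∀ x ∈ t, p ≤ x) →
      (t = [] → d = p) → (∀ h : t ≠ [], t.getLast h = d) →
      (p < aResult t p d ∧ aResult t p d ∉ t ∧
        ∀ k : Int, p < k → k < aResult t p d → k ∈ t) := by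
  intro t
  induction t with
  | nil =>
      intro p d _ _ hd _
      have : d = p := hd rfl
      subst this
      refine ⟨by simp [aResult, pvALoop], by simp, ?_⟩
      intro k h1 h2; simp [aResult, pvALoop] at h2; omega
  | cons x xs ih =>
      intro p d hpw hge hnil hlast
      have hxp : p ≤ x := hge x (List.mem_cons_self ..)
      have hxs_pw : xs.Pairwise (· ≤ ·) := hpw.of_cons
      have hxge : ∀ y ∈ xs, x ≤ y := fun y hy => (List.pairwise_cons.1 hpw).1 y hy
      by_cases h1 : p = x
      · -- skip branch
        have hres : aResult (x :: xs) p d = aResult xs p d := by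
          simp [aResult, pvALoop, h1]
        obtain ⟨ha, hb, hc⟩ := ih p d hxs_pw (fun y hy => h1 ▸ hxge y hy)
          (by intro h; subst h; have := hlast (by simp); simp at this; omega)
          (by intro h; have := hlast (by simp); rwa [List.getLast_cons h] at this)
        rw [hres]
        refine ⟨ha, ?_, ?_⟩
        · intro hmem
          rcases List.mem_cons.1 hmem with h | h
          · omega
          · exact hb h
        · intro k hk1 hk2
          exact List.mem_cons_of_mem _ (hc k hk1 hk2)
      · by_cases h2 : p + 1 = x
        · -- advance branch
          have hres : aResult (x :: xs) p d = aResult xs (p + 1) d := by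
            simp [aResult, pvALoop, h1, h2.symm]
          obtain ⟨ha, hb, hc⟩ := ih (p + 1) d hxs_pw (fun y hy => h2 ▸ hxge y hy)
            (by intro h; subst h; have := hlast (by simp); simp at this; omega)
            (by intro h; have := hlast (by simp); rwa [List.getLast_cons h] at this)
          rw [hres]
          refine ⟨by omega, ?_, ?_⟩
          · intro hmem
            rcases List.mem_cons.1 hmem with h | h
            · omega
            · exact hb h
          · intro k hk1 hk2
            rcases eq_or_lt_of_le (show p + 1 ≤ k by omega) with h | h
            · exact List.mem_cons.2 (Or.inl (by omega))
            · exact List.mem_cons_of_mem _ (hc k h hk2)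
        · -- early return p + 1
          have hres : aResult (x :: xs) p d = p + 1 := by
            simp only [aResult, pvALoop, if_neg h1, if_pos (show (p + 1 : Int) ≠ x by omega)]
          rw [hres]
          have hx2 : p + 2 ≤ x := by omega
          refine ⟨by omega, ?_, ?_⟩
          · intro hmem
            rcases List.mem_cons.1 hmem with h | h
            · omega
            · have := hxge _ h; omega
          · intro k h1 h2; omega

-- basic facts about the sorted list when 0 ∈ arr
theorem sorted_facts (arr : List Int) (h0 : (0 : Int) ∈ arr) :
    ∃ a t, PySem.List.sorted arr (fun x => x) false = a :: t ∧ a ≤ 0 ∧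
      (a :: t).Pairwise (fun u v => u ≤ v) ∧ (∀ x, x ∈ arr ↔ (x = a ∨ x ∈ t)) := by
  have hperm : (PySem.List.sorted arr (fun x => x) false).Perm arr := PySem.List.sorted_perm ..
  have hpw : (PySem.List.sorted arr (fun x => x) false).Pairwise (fun a b => a ≤ b) :=
    PySem.List.sorted_pairwise ..
  have h0s : (0 : Int) ∈ PySem.List.sorted arr (fun x => x) false := hperm.mem_iff.2 h0
  cases hE : PySem.List.sorted arr (fun x => x) false with
  | nil => rw [hE] at h0s; simp at h0s
  | cons a t =>
      rw [hE] at hperm hpw h0s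
      refine ⟨a, t, rfl, ?_, hpw, ?_⟩
      · rcases List.mem_cons.1 h0s with h | h
        · omega
        · exact (List.pairwise_cons.1 hpw).1 0 h
      · intro x
        rw [← hperm.mem_iff, List.mem_cons]

-- with at least two negative entries (and 0 present), A's scan hits the second
-- negative on its first step and returns next_num = 1
theorem a_eq_one_of_two_neg (arr : List Int) (h0 : (0 : Int) ∈ arr)
    (h2 : 2 ≤ (arr.filter (fun x => x < 0)).length) :
    getDifferentNumber arr = 1 := by
  obtain ⟨a, t, hs, ha0, hpw, hmem⟩ := sorted_facts arr h0
  have hperm : (a :: t).Perm arr := by rw [← hs]; exact PySem.List.sorted_perm ..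
  have h2s : 2 ≤ ((a :: t).filter (fun x => x < 0)).length :=
    (hperm.filter _).length_eq ▸ h2
  cases t with
  | nil =>
      exfalso
      simp only [List.filter_cons, List.filter_nil] at h2s
      split at h2s <;> simp at h2s
  | cons x rest =>
      have hx : x < 0 := by
        by_contra hge
        push_neg at hge
        have hrest : ∀ y ∈ rest, 0 ≤ y := fun y hy =>
          le_trans hge ((List.pairwise_cons.1 (List.pairwise_cons.1 hpw).2).1 y hy)
        have : (x :: rest).filter (fun x => x < 0) = [] := by
          rw [List.filter_eq_nil_iff]
          intro y hy
          rcases List.mem_cons.1 hy with h | h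
          · simp [h]; omega
          · simp; exact hrest y h
        simp only [List.filter_cons, this] at h2s
        split at h2s <;> simp at h2s
      simp only [getDifferentNumber, if_pos h0, hs, List.drop_one, List.tail_cons,
        pvALoop, if_neg (show ¬ (0 : Int) = x by omega),
        if_pos (show (1 : Int) ≠ x by omega)]

theorem a_isMex (arr : List Int) (hnd : ¬ D_getDifferentNumber arr) :
    IsMex arr (getDifferentNumber arr) := by
  by_cases h0 : (0 : Int) ∈ arr
  · obtain ⟨a, t, hs, ha0, hpw, hmem⟩ := sorted_facts arr h0
    have htpw : t.Pairwise (fun u v => u ≤ v) := (List.pairwise_cons.1 hpw).2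
    by_cases hneg : ∀ x ∈ t, 0 ≤ x
    · -- at most one negative: the generalized loop lemma applies with p = 0
      have hA : getDifferentNumber arr =
          aResult t 0 ((PySem.List.pyGet? (a :: t) (-1)).getD 0) := by
        simp only [getDifferentNumber, if_pos h0, hs, List.drop_one, List.tail_cons, aResult]
        norm_num
      set d : Int := (PySem.List.pyGet? (a :: t) (-1)).getD 0 with hd
      have hdlast : ∀ h : (a :: t) ≠ [], (a :: t).getLast h = d := by
        intro h
        rw [hd, PySem.List.pyGet?_neg_one, List.getLast?_eq_some_getLast h]
        rfl
      obtain ⟨ha', hb', hc'⟩ := pvALoop_spec t 0 d htpw hneg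
        (by intro ht
            subst ht
            have hdl : d = a := by rw [hd, PySem.List.pyGet?_neg_one]; rfl
            have h00 : a = 0 := by
              rcases (hmem 0).1 h0 with h | h
              · omega
              · simp at h
            omega)
        (by intro ht
            have hdl := hdlast (by simp)
            rwa [List.getLast_cons ht] at hdl)
      rw [hA]
      refine ⟨by omega, ?_, ?_⟩
      · intro hmemA
        rcases (hmem _).1 hmemA with h | h
        · omega
        · exact hb' h
      · intro k hk1 hk2
        rcases eq_or_lt_of_le hk1 with h | h
        · exact h ▸ h0
        · exact (hmem k).2 (Or.inr (hc' k h hk2))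
    · -- at least two negative entries: ¬D forces 1 ∉ arr, and A returns 1
      push_neg at hneg
      obtain ⟨y, hy, hylt⟩ := hneg
      have haneg : a < 0 := by
        have := (List.pairwise_cons.1 hpw).1 y hy
        omega
      have h2 : 2 ≤ (arr.filter (fun x => x < 0)).length := by
        have hperm : (a :: t).Perm arr := by rw [← hs]; exact PySem.List.sorted_perm ..
        rw [← (hperm.filter _).length_eq]
        have hyf : y ∈ t.filter (fun x => x < 0) :=
          List.mem_filter.2 ⟨hy, by simp [hylt]⟩
        have : 1 ≤ (t.filter (fun x => x < 0)).length := List.length_pos_of_mem hyf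
        simp only [List.filter_cons, if_pos (by simp [haneg] : (decide (a < 0)) = true)]
        simp only [List.length_cons]
        omega
      have h1n : (1 : Int) ∉ arr := fun h1 => hnd ⟨h2, h0, h1⟩
      rw [a_eq_one_of_two_neg arr h0 h2]
      refine ⟨by omega, h1n, ?_⟩
      intro k hk1 hk2
      have : k = 0 := by omega
      exact this ▸ h0
  · -- 0 ∉ arr: A returns 0
    simp only [getDifferentNumber, if_neg h0]
    exact ⟨le_refl 0, h0, fun k h1 h2 => absurd h2 (by omega)⟩

-- ===== VERDICT (by name: the statement is the Claim_ definition above) =====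
theorem getDifferentNumber_spec : Claim_unchanged_getDifferentNumber := by
  intro arr _ hnd
  exact isMex_unique (a_isMex arr hnd) (alt_isMex arr)

theorem getDifferentNumber_changed : Claim_changed_getDifferentNumber := by
  unfold Claim_changed_getDifferentNumber; decide

theorem getDifferentNumber_tight : Claim_exact_getDifferentNumber := by
  intro arr _ hD heq
  obtain ⟨h2, h0, h1⟩ := hD
  have hA : getDifferentNumber arr = 1 := a_eq_one_of_two_neg arr h0 h2
  have hB := alt_isMex arr
  rw [hA] at heq
  exact hB.2.1 (heq ▸ h1)
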